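-- pv_equiv track=rewrite | github.com/a-tal/nagaram | src/nagaram.py | _blank_tiles
-- ===== SOURCE A (Python) =====
-- def _blank_tiles(input_word):
--     """Searches a string for blank tile characters ("?" and "_").
--
--     Args:
--         input_word: the user supplied string to search through
--
--     Returns:
--         a tuple of:
--             input_word without blanks
--             integer number of blanks (no points)
--             integer number of questions (points)
--     """
--
--     blanks = 0
--     questions = 0
--     input_letters = list()
--     for letter in input_word:
--         if letter == "_":
--             blanks += 1
--         elif letter == "?":
--             questions += 1
--         else:
--             input_letters.append(letter)
--     return input_letters, blanks, questions
-- ===== SOURCE B (Python) =====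
-- def _blank_tiles(input_word):
--     """Delete the sentinel characters with str.replace and recover the counts
--     from the length differences; no explicit counting or filtering loop."""
--     no_blanks = input_word.replace("_", "")
--     no_both = no_blanks.replace("?", "")
--     blanks = len(input_word) - len(no_blanks)
--     questions = len(no_blanks) - len(no_both)
--     return list(no_both), blanks, questions
-- ===== Notes on version B (the rewrite author's own statement) =====
-- stated objective: alternative
-- what changed: Instead of classifying each character in one accumulating loop, B deletes '_' then '?' with str.replace and recovers both counts as length differences of the successive strings; the letters are list() of the doubly-replaced string.
import Mathlib
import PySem

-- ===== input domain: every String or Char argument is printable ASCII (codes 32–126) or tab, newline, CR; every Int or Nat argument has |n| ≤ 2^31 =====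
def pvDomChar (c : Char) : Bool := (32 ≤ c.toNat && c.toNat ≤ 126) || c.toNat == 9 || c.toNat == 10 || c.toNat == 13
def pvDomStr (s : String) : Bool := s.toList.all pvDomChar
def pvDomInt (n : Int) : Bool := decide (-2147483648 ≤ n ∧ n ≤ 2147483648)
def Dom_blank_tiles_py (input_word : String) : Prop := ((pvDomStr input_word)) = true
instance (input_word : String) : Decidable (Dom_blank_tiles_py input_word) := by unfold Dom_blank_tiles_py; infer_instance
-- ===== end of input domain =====

-- B deletes '_' and '?' with str.replace and recovers both counts as length
-- differences instead of classifying each character in one loop; objective: alternative.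

-- ===== PORT A =====
-- literal port of A's one loop: state (input_letters, blanks, questions), branches in order
def blank_tiles_py (input_word : String) : List String × Int × Int :=
  let st := input_word.toList.foldl
    (fun (st : List String × Int × Int) letter =>
      if letter == '_' then (st.1, st.2.1 + 1, st.2.2)
      else if letter == '?' then (st.1, st.2.1, st.2.2 + 1)
      else (st.1 ++ [String.ofList [letter]], st.2.1, st.2.2))
    ([], 0, 0)
  st

-- ===== PORT B =====
-- literal port of Source B: two str.replace deletions, counts as length differences
def blank_tiles_py_alt (input_word : String) : List String × Int × Int :=
  let no_blanks := PySem.Str.replace input_word "_" ""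
  let no_both := PySem.Str.replace no_blanks "?" ""
  let blanks : Int := (PySem.Str.len input_word : Int) - (PySem.Str.len no_blanks : Int)
  let questions : Int := (PySem.Str.len no_blanks : Int) - (PySem.Str.len no_both : Int)
  (no_both.toList.map (fun letter => String.ofList [letter]), blanks, questions)

-- ===== PRECONDITION & SPEC =====
def Spec_blank_tiles_py (input_word : String) (out : List String × Int × Int) : Prop := out = blank_tiles_py_alt input_word
instance (input_word : String) (out : List String × Int × Int) : Decidable (Spec_blank_tiles_py input_word out) := by unfold Spec_blank_tiles_py; infer_instance

-- ===== CLAIM (what is proved, stated in full; the proofs are below) =====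
def Claim_equal_blank_tiles_py : Prop := ∀ (input_word : String), Dom_blank_tiles_py input_word → Spec_blank_tiles_py input_word (blank_tiles_py input_word)

-- ===== LEMMAS AND PROOFS =====

-- replacing a single character by "" is filtering it out
theorem pv_replace_go_del (c : Char) :
    ∀ (l : List Char) (fuel : Nat) (acc : List Char), l.length ≤ fuel →
      PySem.Chars.replace.go [c] [] fuel l acc = acc.reverse ++ l.filter (· ≠ c) := by
  intro l
  induction l with
  | nil => intro fuel acc _; cases fuel <;> simp [PySem.Chars.replace.go]
  | cons h t ih =>
    intro fuel acc hlen
    cases fuel with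
    | zero => simp at hlen
    | succ n =>
      rw [List.length_cons] at hlen
      simp only [PySem.Chars.replace.go, List.isPrefixOf, List.filter_cons]
      by_cases hc : c = h
      · subst hc
        simp only [beq_self_eq_true, Bool.true_and, if_pos, List.length_cons,
          List.length_nil, List.drop_succ_cons, List.drop_zero]
        rw [ih n _ (by omega)]
        simp
      · have hb : (c == h) = false := by simp [hc]
        simp only [hb, Bool.false_and, Bool.false_eq_true, if_false]
        rw [ih n _ (by omega)]
        simp [Ne.symm hc]

theorem pv_replace_del (l : List Char) (c : Char) :
    PySem.Chars.replace l [c] [] = l.filter (· ≠ c) := by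
  simp only [PySem.Chars.replace]
  have h : ([c] : List Char).isEmpty = false := rfl
  rw [h]
  simp only [Bool.false_eq_true, if_false]
  rw [pv_replace_go_del c l l.length [] (le_refl _)]
  simp

-- the count of c is the length dropped by filtering c out
theorem pv_filtered_len (l : List Char) (c : Char) :
    (l.filter (· ≠ c)).length + l.count c = l.length := by
  induction l with
  | nil => simp
  | cons h t ih =>
    simp only [List.filter_cons, List.count_cons, List.length_cons]
    by_cases hc : h = c
    · subst hc; simp at ih ⊢; omega
    · simp [hc] at ih ⊢; omega

-- invariant of A's loop: it accumulates the filtered letters and both counts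
theorem pv_loop_inv (l : List Char) :
    ∀ (st : List String × Int × Int),
      l.foldl
        (fun (st : List String × Int × Int) letter =>
          if letter == '_' then (st.1, st.2.1 + 1, st.2.2)
          else if letter == '?' then (st.1, st.2.1, st.2.2 + 1)
          else (st.1 ++ [String.ofList [letter]], st.2.1, st.2.2)) st
      = (st.1 ++ (l.filter (fun letter => letter ≠ '_' ∧ letter ≠ '?')).map (fun letter => String.ofList [letter]),
         st.2.1 + (l.count '_' : Int), st.2.2 + (l.count '?' : Int)) := by
  induction l with
  | nil => intro st; simp
  | cons h t ih =>
    intro st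
    simp only [List.foldl_cons, List.filter_cons, List.count_cons]
    by_cases h1 : h = '_'
    · subst h1; rw [ih]; simp; omega
    · by_cases h2 : h = '?'
      · subst h2; rw [ih]; simp [h1]; omega
      · rw [ih]; simp [h1, h2, List.append_assoc]

-- filtering '_' out does not change the number of '?'
theorem pv_count_q (l : List Char) :
    (l.filter (· ≠ '_')).count '?' = l.count '?' := by
  induction l with
  | nil => rfl
  | cons h t ih =>
    simp only [List.filter_cons]
    by_cases hc : h = '_'
    · subst hc; simp
    · simp [hc, List.count_cons]

-- successive single-character filters compose to the two-character filter
theorem pv_filter_filter (l : List Char) :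
    (l.filter (· ≠ '_')).filter (· ≠ '?')
      = l.filter (fun letter => letter ≠ '_' ∧ letter ≠ '?') := by
  rw [List.filter_filter]
  apply List.filter_congr
  intro x _
  by_cases h1 : x = '_' <;> by_cases h2 : x = '?' <;> simp [h1, h2]

-- ===== VERDICT (by name: the statement is the Claim_ definition above) =====
theorem blank_tiles_py_spec : Claim_equal_blank_tiles_py := by
  intro input_word _
  show blank_tiles_py input_word = blank_tiles_py_alt input_word
  unfold blank_tiles_py blank_tiles_py_alt
  rw [pv_loop_inv]
  simp only [List.nil_append, zero_add, PySem.Str.len, PySem.Str.replace]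
  have hmk : ∀ (cs : List Char), (String.ofList cs).toList = cs := fun cs => by simp
  simp only [hmk, pv_replace_del, pv_filter_filter]
  refine Prod.ext rfl (Prod.ext ?_ ?_)
  · dsimp only
    have := pv_filtered_len input_word.toList '_'
    omega
  · dsimp only
    have h2 := pv_filtered_len (input_word.toList.filter (· ≠ '_')) '?'
    rw [pv_filter_filter] at h2
    have h3 := pv_count_q input_word.toList
    omega
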